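-- pv_equiv track=rewrite | github.com/bdegenkolbe/Wolkenklar | build_github_wiki.py | shift_headings
-- ===== SOURCE A (Python) =====
-- def shift_headings(text):
--     """Shift heading levels: H2→H1, H3→H2, H4→H3."""
--     lines = text.split('\n')
--     result = []
--     for line in lines:
--         if line.startswith('#### '):
--             result.append('### ' + line[5:])
--         elif line.startswith('### '):
--             result.append('## ' + line[4:])
--         elif line.startswith('## '):
--             result.append('# ' + line[3:])
--         else:
--             result.append(line)
--     return '\n'.join(result)
-- ===== SOURCE B (Python) =====
-- def shift_headings(text):
--     """Shift heading levels: H2->H1, H3->H2, H4->H3 (single char-level pass, no line splitting)."""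
--     out = []
--     i = 0
--     n = len(text)
--     at_start = True
--     while i < n:
--         if at_start:
--             j = i
--             while j < n and text[j] == '#':
--                 j += 1
--             k = j - i
--             if 2 <= k <= 4 and j < n and text[j] == ' ':
--                 out.append('#' * (k - 1))
--                 i = j
--                 at_start = False
--                 continue
--         c = text[i]
--         out.append(c)
--         at_start = (c == '\n')
--         i += 1
--     return ''.join(out)
-- ===== Notes on version B (the rewrite author's own statement) =====
-- stated objective: alternative
-- what changed: Replaces A's split-on-newline, per-line startswith branch chain and join by a single left-to-right pass over the characters that, at each line start, measures the run of leading hash marks and drops one of them when the run has length 2-4 and is followed by a space.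
import Mathlib
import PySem

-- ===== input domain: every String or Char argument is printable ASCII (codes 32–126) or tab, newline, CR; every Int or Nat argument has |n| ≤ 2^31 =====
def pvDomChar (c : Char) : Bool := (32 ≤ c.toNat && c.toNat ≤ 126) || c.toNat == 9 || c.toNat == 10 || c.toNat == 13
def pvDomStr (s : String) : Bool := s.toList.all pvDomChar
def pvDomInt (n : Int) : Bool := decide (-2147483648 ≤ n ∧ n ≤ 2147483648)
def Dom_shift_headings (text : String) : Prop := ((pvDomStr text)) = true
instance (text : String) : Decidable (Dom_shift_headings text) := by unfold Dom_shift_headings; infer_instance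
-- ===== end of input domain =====

-- B replaces A's split-on-'\n' / per-line branch chain / join by a single left-to-right pass
-- over the characters that shrinks a run of 2–4 '#' at each line start (objective: alternative).

-- ===== PORT A =====
-- A works on the string's characters; ported over List Char (exact: str '+' is '++',
-- line[k:] is Chars.slice, split('\n') is Chars.splitOn, '\n'.join is Chars.join).
def shiftLineA (line : List Char) : List Char :=
  if PySem.Chars.startswith line "#### ".toList then
    "### ".toList ++ PySem.Chars.slice line (some 5) none
  else if PySem.Chars.startswith line "### ".toList then
    "## ".toList ++ PySem.Chars.slice line (some 4) none
  else if PySem.Chars.startswith line "## ".toList then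
    "# ".toList ++ PySem.Chars.slice line (some 3) none
  else
    line

def shift_headings (text : String) : String :=
  let lines := PySem.Chars.splitOn text.toList "\n".toList
  let result := lines.foldl (fun acc line => acc ++ [shiftLineA line]) []
  String.ofList (PySem.Chars.join "\n".toList result)

-- ===== PORT B =====
-- count of leading '#' characters (B's inner `while text[j] == '#'` scan)
def countHash : List Char → Nat
  | [] => 0
  | c :: rest => if c = '#' then countHash rest + 1 else 0

-- B's while loop: one pass, `atStart` tracks whether we stand at a line start.
def runB : List Char → Bool → List Char
  | [], _ => []
  | c :: rest, atStart =>
    if atStart ∧ 2 ≤ countHash (c :: rest) ∧ countHash (c :: rest) ≤ 4 ∧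
        ((c :: rest).drop (countHash (c :: rest))).head? = some ' ' then
      List.replicate (countHash (c :: rest) - 1) '#' ++
        runB ((c :: rest).drop (countHash (c :: rest))) false
    else
      c :: runB rest (c == '\n')
termination_by cs _ => cs.length
decreasing_by
  · simp only [List.length_drop, List.length_cons]; omega
  · simp

def shift_headings_alt (text : String) : String :=
  String.ofList (runB text.toList true)

-- ===== PRECONDITION & SPEC =====
def Spec_shift_headings (text : String) (out : String) : Prop := out = shift_headings_alt text
instance (text : String) (out : String) : Decidable (Spec_shift_headings text out) := by unfold Spec_shift_headings; infer_instance

-- ===== CLAIM (what is proved, stated in full; the proofs are below) =====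
def Claim_equal_shift_headings : Prop := ∀ (text : String), Dom_shift_headings text → Spec_shift_headings text (shift_headings text)

-- ===== LEMMAS AND PROOFS =====

-- reference split on '\n': the first line and the remaining lines
def splitNL : List Char → List Char × List (List Char)
  | [] => ([], [])
  | c :: rest =>
    let p := splitNL rest
    if c = '\n' then ([], p.1 :: p.2) else (c :: p.1, p.2)

-- rendering of the lines after the first: each preceded by '\n', heading-shifted
def Jf (ts : List (List Char)) : List Char :=
  (ts.map (fun l => '\n' :: shiftLineA l)).flatten

lemma countHash_cons (c : Char) (rest : List Char) :
    countHash (c :: rest) = if c = '#' then countHash rest + 1 else 0 := rfl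

lemma splitOn_go_nl (fuel : Nat) : ∀ (l cur : List Char) (acc : List (List Char)),
    l.length ≤ fuel →
    PySem.Chars.splitOn.go ['\n'] fuel l cur acc =
      acc.reverse ++ (cur.reverse ++ (splitNL l).1) :: (splitNL l).2 := by
  induction fuel with
  | zero =>
    intro l cur acc hl
    have : l = [] := List.length_eq_zero_iff.mp (Nat.le_zero.mp hl)
    subst this
    simp [PySem.Chars.splitOn.go, splitNL]
  | succ n ih =>
    intro l cur acc hl
    match l with
    | [] => simp [PySem.Chars.splitOn.go, splitNL]
    | c :: rest =>
      rw [PySem.Chars.splitOn.go]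
      by_cases hc : c = '\n'
      · subst hc
        have hp : List.isPrefixOf ['\n'] ('\n' :: rest) = true := by
          simp [List.isPrefixOf]
        simp only [hp, if_pos, List.length_cons, List.length_nil, Nat.zero_add,
          List.drop_succ_cons, List.drop_zero]
        rw [ih rest [] (cur.reverse :: acc) (by simpa using Nat.le_of_succ_le_succ hl)]
        simp [splitNL]
      · have hp : List.isPrefixOf ['\n'] (c :: rest) = false := by
          simp [List.isPrefixOf]
          intro h; exact absurd h.symm hc
        simp only [hp, Bool.false_eq_true, if_false]
        rw [ih rest (c :: cur) acc (by simpa using Nat.le_of_succ_le_succ hl)]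
        simp [splitNL, hc]

lemma splitOn_nl (cs : List Char) :
    PySem.Chars.splitOn cs ['\n'] = (splitNL cs).1 :: (splitNL cs).2 := by
  rw [PySem.Chars.splitOn]
  rw [splitOn_go_nl (cs.length + 1) cs [] [] (by omega)]
  simp

lemma foldl_append_map {α β : Type} (f : α → β) :
    ∀ (ls : List α) (acc : List β), ls.foldl (fun a l => a ++ [f l]) acc = acc ++ ls.map f := by
  intro ls
  induction ls with
  | nil => simp
  | cons x xs ih => intro acc; simp [List.foldl, ih]

lemma join_nl (xs : List (List Char)) (x : List Char) :
    PySem.Chars.join ['\n'] (x :: xs) = x ++ (xs.map (fun l => '\n' :: l)).flatten := by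
  induction xs generalizing x with
  | nil => simp [PySem.Chars.join, List.intercalate]
  | cons y ys ih =>
    have h1 : List.intercalate ['\n'] (x :: y :: ys) =
        x ++ '\n' :: List.intercalate ['\n'] (y :: ys) := by
      simp [List.intercalate, List.intersperse]
    simp only [PySem.Chars.join] at ih ⊢
    rw [h1, ih y]
    simp

lemma countHash_prefix : ∀ cs : List Char,
    cs = List.replicate (countHash cs) '#' ++ cs.drop (countHash cs) := by
  intro cs
  induction cs with
  | nil => rfl
  | cons c rest ih =>
    by_cases hc : c = '#'
    · subst hc
      conv_lhs => rw [ih]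
      simp [countHash, List.replicate_succ]
    · simp [countHash, hc]

lemma startswith_iff_guard (k : Nat) : ∀ (cs : List Char),
    PySem.Chars.startswith cs (List.replicate k '#' ++ [' ']) = true ↔
      countHash cs = k ∧ (cs.drop k).head? = some ' ' := by
  induction k with
  | zero =>
    intro cs
    match cs with
    | [] => simp [PySem.Chars.startswith, countHash]
    | c :: rest =>
      simp only [List.replicate_zero, List.nil_append, PySem.Chars.startswith,
        List.isPrefixOf]
      constructor
      · intro h
        simp at h
        subst h
        simp [countHash_cons]
      · rintro ⟨h1, h2⟩
        simp only [List.drop_zero, List.head?_cons, Option.some.injEq] at h2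
        subst h2
        simp
  | succ n ih =>
    intro cs
    match cs with
    | [] =>
      simp [PySem.Chars.startswith, List.replicate_succ, countHash]
    | c :: rest =>
      by_cases hc : c = '#'
      · subst hc
        simp only [List.replicate_succ, List.cons_append, PySem.Chars.startswith,
          List.isPrefixOf, beq_self_eq_true, Bool.true_and, List.drop_succ_cons]
        have := ih rest
        simp only [PySem.Chars.startswith] at this
        rw [this, countHash_cons]
        simp
      · simp only [List.replicate_succ, List.cons_append, PySem.Chars.startswith,
          List.isPrefixOf, List.drop_succ_cons, countHash_cons, if_neg hc]
        constructor
        · intro h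
          simp at h
          exact absurd h.1.symm hc
        · omega

lemma splitNL_append_no_nl : ∀ (l : List Char), '\n' ∉ l → ∀ (cs : List Char),
    splitNL (l ++ cs) = (l ++ (splitNL cs).1, (splitNL cs).2) := by
  intro l
  induction l with
  | nil => intro _ cs; simp
  | cons c rest ih =>
    intro hn cs
    have hc : c ≠ '\n' := fun h => hn (h ▸ List.mem_cons_self)
    simp only [List.cons_append, splitNL, if_neg hc]
    rw [ih (fun h => hn (List.mem_cons_of_mem _ h)) cs]

lemma prefix_takeWhile {p : List Char} {q : Char → Bool} (hq : ∀ c ∈ p, q c = true) :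
    ∀ cs : List Char, (p <+: cs.takeWhile q) ↔ (p <+: cs) := by
  induction p with
  | nil => intro cs; simp
  | cons a p' ih =>
    intro cs
    match cs with
    | [] => simp
    | c :: cs' =>
      by_cases hqc : q c = true
      · rw [List.takeWhile_cons_of_pos hqc]
        simp only [List.cons_prefix_cons]
        exact and_congr_right fun _ => ih (fun x hx => hq x (List.mem_cons_of_mem _ hx)) cs'
      · rw [List.takeWhile_cons_of_neg hqc]
        simp only [List.cons_prefix_cons]
        constructor
        · intro h; exact absurd h (by simp)
        · rintro ⟨h1, _⟩
          exact absurd (h1 ▸ hq a List.mem_cons_self) hqc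

lemma splitNL_fst : ∀ cs : List Char, (splitNL cs).1 = cs.takeWhile (fun c => !(c == '\n')) := by
  intro cs
  induction cs with
  | nil => simp [splitNL]
  | cons c rest ih =>
    by_cases hc : c = '\n'
    · subst hc; simp [splitNL]
    · simp [splitNL, hc, ih]

lemma startswith_firstline (cs p : List Char) (hp : '\n' ∉ p) :
    PySem.Chars.startswith (splitNL cs).1 p = true ↔ PySem.Chars.startswith cs p = true := by
  rw [splitNL_fst]
  simp only [PySem.Chars.startswith, List.isPrefixOf_iff_prefix]
  exact prefix_takeWhile (fun c hc => by
    simp only [Bool.not_eq_eq_eq_not, Bool.not_true, beq_eq_false_iff_ne, ne_eq]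
    exact fun h => hp (h ▸ hc)) cs

lemma shiftLine_noguard (cs : List Char)
    (hg : ¬ (2 ≤ countHash cs ∧ countHash cs ≤ 4 ∧ (cs.drop (countHash cs)).head? = some ' ')) :
    shiftLineA (splitNL cs).1 = (splitNL cs).1 := by
  have key : ∀ k : Nat, PySem.Chars.startswith (splitNL cs).1 (List.replicate k '#' ++ [' ']) = true →
      countHash cs = k ∧ (cs.drop k).head? = some ' ' := by
    intro k h
    have hnp : '\n' ∉ List.replicate k '#' ++ [' '] := by
      intro hm
      rcases List.mem_append.mp hm with h1 | h1
      · exact absurd (List.eq_of_mem_replicate h1) (by decide)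
      · simp at h1
    exact (startswith_iff_guard k cs).mp ((startswith_firstline cs _ hnp).mp h)
  unfold shiftLineA
  split_ifs with h2 h3 h4
  · have := key 4 (by simpa using h2)
    exact absurd ⟨by omega, by omega, this.1 ▸ this.2⟩ hg
  · have := key 3 (by simpa using h3)
    exact absurd ⟨by omega, by omega, this.1 ▸ this.2⟩ hg
  · have := key 2 (by simpa using h4)
    exact absurd ⟨by omega, by omega, this.1 ▸ this.2⟩ hg
  · rfl

lemma shiftA_nil : shiftLineA [] = [] := by decide

lemma shift2 (h : List Char) : shiftLineA ('#'::'#'::' '::h) = '#'::' '::h := by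
  simp [shiftLineA, PySem.Chars.startswith, List.isPrefixOf, pysem]
lemma shift3 (h : List Char) : shiftLineA ('#'::'#'::'#'::' '::h) = '#'::'#'::' '::h := by
  simp [shiftLineA, PySem.Chars.startswith, List.isPrefixOf, pysem]
lemma shift4 (h : List Char) : shiftLineA ('#'::'#'::'#'::'#'::' '::h) = '#'::'#'::'#'::' '::h := by
  simp [shiftLineA, PySem.Chars.startswith, List.isPrefixOf, pysem]

lemma main_lemma (n : Nat) : ∀ cs : List Char, cs.length ≤ n →
    (runB cs false = (splitNL cs).1 ++ Jf (splitNL cs).2) ∧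
    (runB cs true = shiftLineA (splitNL cs).1 ++ Jf (splitNL cs).2) := by
  induction n with
  | zero =>
    intro cs hl
    have : cs = [] := List.length_eq_zero_iff.mp (Nat.le_zero.mp hl)
    subst this
    exact ⟨by simp [runB, splitNL, Jf], by simp [runB, splitNL, Jf, shiftA_nil]⟩
  | succ n ih =>
    intro cs hl
    match cs with
    | [] => exact ⟨by simp [runB, splitNL, Jf], by simp [runB, splitNL, Jf, shiftA_nil]⟩
    | c :: rest =>
      have hrest : rest.length ≤ n := by simpa using Nat.le_of_succ_le_succ hl
      constructor
      · -- atStart = false : plain copy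
        rw [runB, if_neg (by simp)]
        by_cases hc : c = '\n'
        · subst hc
          simp [splitNL, Jf, (ih rest hrest).2]
        · rw [show (c == '\n') = false by simp [hc]]
          simp [splitNL, Jf, hc, (ih rest hrest).1]
      · -- atStart = true
        rw [runB]
        by_cases hg : 2 ≤ countHash (c :: rest) ∧ countHash (c :: rest) ≤ 4 ∧
            ((c :: rest).drop (countHash (c :: rest))).head? = some ' '
        · rw [if_pos ⟨rfl, hg⟩]
          obtain ⟨hk2, hk4, hsp⟩ := hg
          cases hdk : (c :: rest).drop (countHash (c :: rest)) with
          | nil => rw [hdk] at hsp; simp at hsp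
          | cons d t =>
            rw [hdk] at hsp
            simp only [List.head?_cons, Option.some.injEq] at hsp
            subst hsp
            have hshape : c :: rest =
                List.replicate (countHash (c :: rest)) '#' ++ ' ' :: t := by
              conv_lhs => rw [countHash_prefix (c :: rest)]
              rw [hdk]
            have hlen : (' ' :: t).length ≤ n := by
              have := congrArg List.length hshape
              simp at this ⊢
              omega
            have hnp : '\n' ∉ List.replicate (countHash (c :: rest)) '#' := by
              intro hm
              exact absurd (List.eq_of_mem_replicate hm) (by decide)
            have hsplit := splitNL_append_no_nl _ hnp (' ' :: t)
            rw [(ih (' ' :: t) hlen).1]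
            conv_rhs => rw [hshape, hsplit]
            have hsp2 : splitNL (' ' :: t) = (' ' :: (splitNL t).1, (splitNL t).2) := by
              simp [splitNL]
            rw [hsp2]
            set k := countHash (c :: rest) with hk
            clear_value k
            rcases (by omega : k = 2 ∨ k = 3 ∨ k = 4) with rfl | rfl | rfl <;>
              simp [List.replicate_succ, shift2, shift3, shift4]
        · rw [if_neg (fun h => hg h.2)]
          by_cases hc : c = '\n'
          · subst hc
            simp [splitNL, Jf, (ih rest hrest).2, shiftA_nil]
          · have hng := shiftLine_noguard (c :: rest) hg
            have hsp : splitNL (c :: rest) = (c :: (splitNL rest).1, (splitNL rest).2) := by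
              simp [splitNL, hc]
            rw [hsp] at hng ⊢
            rw [hng, show (c == '\n') = false by simp [hc]]
            simp [Jf, (ih rest hrest).1]

-- ===== VERDICT (by name: the statement is the Claim_ definition above) =====
theorem shift_headings_spec : Claim_equal_shift_headings := by
  intro text _
  unfold Spec_shift_headings shift_headings shift_headings_alt
  have hnl : ("\n".toList : List Char) = ['\n'] := by decide
  simp only [hnl, splitOn_nl, foldl_append_map, List.nil_append]
  rw [(main_lemma text.toList.length text.toList le_rfl).2, List.map_cons, join_nl]
  simp [Jf, Function.comp_def]
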